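-- pv_equiv track=rewrite | github.com/thePeras/VCOM_Chessboard | board_draw.py | matrix_to_fen
-- ===== SOURCE A (Python) =====
-- def matrix_to_fen(matrix):
--     fen_rows = []
--     for row in matrix:
--         fen_row = ""
--         empty = 0
--         for piece in row:
--             if piece == "":
--                 empty += 1
--             else:
--                 if empty > 0:
--                     fen_row += str(empty)
--                     empty = 0
--                 fen_row += piece
--         if empty > 0:
--             fen_row += str(empty)
--         fen_rows.append(fen_row)
--     fen_position = "/".join(fen_rows)
--     return fen_position + " w KQkq - 0 1"
-- ===== SOURCE B (Python) =====
-- def matrix_to_fen(matrix):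
--     def enc(row):
--         if not row:
--             return ''
--         if row[0] == '':
--             i = 1
--             while i < len(row) and row[i] == '':
--                 i += 1
--             return str(i) + enc(row[i:])
--         i = 1
--         while i < len(row) and row[i] != '':
--             i += 1
--         return ''.join(row[:i]) + enc(row[i:])
--     return '/'.join(enc(row) for row in matrix) + ' w KQkq - 0 1'
-- ===== Notes on version B (the rewrite author's own statement) =====
-- stated objective: alternative
-- what changed: Replaces A's stateful per-cell loop (running empty-counter with flush branches) by a run-length decomposition: each row is recursively split into maximal runs of empty/non-empty cells, empty runs become their length, piece runs are joined directly.
import Mathlib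
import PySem

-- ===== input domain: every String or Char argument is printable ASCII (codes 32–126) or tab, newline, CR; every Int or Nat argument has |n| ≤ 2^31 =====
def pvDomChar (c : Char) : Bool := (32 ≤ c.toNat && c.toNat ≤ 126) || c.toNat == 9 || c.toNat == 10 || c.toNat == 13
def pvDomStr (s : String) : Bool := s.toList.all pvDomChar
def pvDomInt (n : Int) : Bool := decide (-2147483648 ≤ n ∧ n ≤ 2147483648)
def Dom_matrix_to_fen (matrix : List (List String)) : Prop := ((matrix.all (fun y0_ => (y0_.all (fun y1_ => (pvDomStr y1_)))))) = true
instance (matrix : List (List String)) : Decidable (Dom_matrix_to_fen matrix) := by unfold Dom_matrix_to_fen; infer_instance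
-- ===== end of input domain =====

-- B replaces A's running empty-counter with flush branches by recursive run-length grouping of each row (alternative decomposition, same cost).

-- ===== PORT A =====
-- inner loop body: state = (fen_row as chars, empty counter)
def pvAStep (st : List Char × Int) (piece : String) : List Char × Int :=
  if piece = "" then (st.1, st.2 + 1)
  else ((if st.2 > 0 then st.1 ++ PySem.Int.toChars st.2 else st.1) ++ piece.toList, 0)

-- trailing flush after the inner loop
def pvAFinish (st : List Char × Int) : List Char :=
  if st.2 > 0 then st.1 ++ PySem.Int.toChars st.2 else st.1

def matrix_to_fen (matrix : List (List String)) : String :=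
  let fen_rows := matrix.foldl (fun acc row => acc ++ [pvAFinish (row.foldl pvAStep ([], 0))]) []
  String.mk (List.intercalate ['/'] fen_rows ++ " w KQkq - 0 1".toList)

-- ===== PORT B =====
-- enc: split the row into maximal runs; an empty run becomes its length, a piece run is joined
def pvBRow : List String → List Char
  | [] => []
  | p :: rest =>
    if p = "" then
      PySem.Int.toChars (((rest.takeWhile (· == "")).length : Int) + 1) ++
        pvBRow (rest.dropWhile (· == ""))
    else
      (p :: rest.takeWhile (· != "")).flatMap String.toList ++
        pvBRow (rest.dropWhile (· != ""))
termination_by row => row.length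
decreasing_by
  · have := rest.length_dropWhile_le (· == ""); simp only [List.length_cons]; omega
  · have := rest.length_dropWhile_le (· != ""); simp only [List.length_cons]; omega

def matrix_to_fen_alt (matrix : List (List String)) : String :=
  String.mk (List.intercalate ['/'] (matrix.map pvBRow) ++ " w KQkq - 0 1".toList)

-- ===== PRECONDITION & SPEC =====
def Spec_matrix_to_fen (matrix : List (List String)) (out : String) : Prop := out = matrix_to_fen_alt matrix
instance (matrix : List (List String)) (out : String) : Decidable (Spec_matrix_to_fen matrix out) := by unfold Spec_matrix_to_fen; infer_instance

-- ===== CLAIM (what is proved, stated in full; the proofs are below) =====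
def Claim_equal_matrix_to_fen : Prop := ∀ (matrix : List (List String)), Dom_matrix_to_fen matrix → Spec_matrix_to_fen matrix (matrix_to_fen matrix)

-- ===== LEMMAS AND PROOFS =====

-- B's encoding of a row starting with a non-empty piece prepends that piece's characters
lemma pvB_cons_piece (p : String) (rest : List String) (hp : p ≠ "") :
    pvBRow (p :: rest) = p.toList ++ pvBRow rest := by
  match rest with
  | [] => simp [pvBRow, hp]
  | q :: rest' =>
    by_cases hq : q = ""
    · subst hq
      simp [pvBRow, hp]
    · rw [pvBRow, pvBRow]
      simp [hp, hq, List.takeWhile, List.dropWhile,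
        (by simpa using hq : (q != "") = true)]

-- splitting off the leading run of empties from `replicate m "" ++ p :: rest`
lemma tw_rep (m : Nat) (p : String) (rest : List String) (hp : p ≠ "") :
    (List.replicate m "" ++ p :: rest).takeWhile (· == "") = List.replicate m ""
    ∧ (List.replicate m "" ++ p :: rest).dropWhile (· == "") = p :: rest := by
  induction m with
  | zero => simp [(by simpa using hp : (p == "") = false)]
  | succ k ih => simpa [List.replicate_succ, List.takeWhile, List.dropWhile] using ih

lemma tw_rep_nil (m : Nat) :
    ((List.replicate m "").takeWhile (fun x : String => x == "") = List.replicate m "")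
    ∧ ((List.replicate m "").dropWhile (fun x : String => x == "") = []) := by
  induction m with
  | zero => simp
  | succ k ih => simp [List.replicate_succ, ih]

-- B on a pure run of m+1 empties
lemma pvB_rep (m : Nat) :
    pvBRow (List.replicate (m + 1) "") = PySem.Int.toChars ((m : Int) + 1) := by
  rw [List.replicate_succ, pvBRow]
  simp [(tw_rep_nil m).1, (tw_rep_nil m).2, pvBRow]

-- B on m+1 empties followed by a piece
lemma pvB_rep_cons (m : Nat) (p : String) (rest : List String) (hp : p ≠ "") :
    pvBRow (List.replicate (m + 1) "" ++ p :: rest) =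
      PySem.Int.toChars ((m : Int) + 1) ++ pvBRow (p :: rest) := by
  rw [List.replicate_succ, List.cons_append, pvBRow]
  simp [(tw_rep m p rest hp).1, (tw_rep m p rest hp).2]

-- invariant of A's inner loop: a pending counter n behaves like n leading empty cells for B
lemma main_fold (row : List String) (acc : List Char) (n : Nat) :
    pvAFinish (row.foldl pvAStep (acc, (n : Int))) =
      acc ++ pvBRow (List.replicate n "" ++ row) := by
  induction row generalizing acc n with
  | nil =>
    simp only [List.foldl_nil, List.append_nil, pvAFinish]
    match n with
    | 0 => simp [pvBRow]
    | m + 1 =>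
      rw [pvB_rep m]
      have hc : ((m + 1 : Nat) : Int) = (m : Int) + 1 := by push_cast; ring
      simp [hc]
  | cons p rest ih =>
    by_cases hp : p = ""
    · subst hp
      rw [List.foldl_cons]
      have h1 : pvAStep (acc, (n : Int)) "" = (acc, ((n + 1 : Nat) : Int)) := by
        simp [pvAStep]
      rw [h1, ih]
      congr 1
      rw [List.replicate_succ']
      simp
    · rw [List.foldl_cons]
      have h1 : pvAStep (acc, (n : Int)) p =
          ((if (n : Int) > 0 then acc ++ PySem.Int.toChars (n : Int) else acc) ++ p.toList,
            ((0 : Nat) : Int)) := by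
        simp [pvAStep, hp]
      rw [h1, ih]
      match n with
      | 0 => simp [pvB_cons_piece p rest hp]
      | m + 1 =>
        rw [pvB_rep_cons m p rest hp, pvB_cons_piece p rest hp]
        have hc : ((m + 1 : Nat) : Int) = (m : Int) + 1 := by push_cast; ring
        simp [hc]

-- ===== VERDICT (by name: the statement is the Claim_ definition above) =====
theorem matrix_to_fen_spec : Claim_equal_matrix_to_fen := by
  intro matrix _
  unfold Spec_matrix_to_fen matrix_to_fen matrix_to_fen_alt
  rw [PySem.List.foldl_append_singleton_eq_map]
  have hmap : List.map (fun row => pvAFinish (row.foldl pvAStep ([], 0))) matrix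
      = List.map pvBRow matrix :=
    List.map_congr_left (fun row _ => by simpa using main_fold row [] 0)
  rw [hmap]
  rfl
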